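-- pv_equiv track=rewrite | github.com/TCChris205/AIConnect | MainProject/constraint_parser_test/csp_parser.py | split_description_and_clues
-- ===== SOURCE A (Python) =====
-- def split_description_and_clues(text: str):
--     """
--     Takes the full puzzle string.
--     Splits into:
--       - desc_text: everything before '## Clues'
--       - clue_lines: non-empty lines in the clues section
--     """
--     lines = text.splitlines()
--     desc_lines = []
--     clue_lines = []
--     in_clues = False
--
--     for line in lines:
--         stripped = line.strip()
--         if not in_clues:
--             if stripped.startswith("## Clues"):
--                 in_clues = True
--             else:
--                 desc_lines.append(line)
--         else:
--             if stripped:  # skip empty lines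
--                 clue_lines.append(line.rstrip("\n"))
--
--     return "\n".join(desc_lines), clue_lines
-- ===== SOURCE B (Python) =====
-- def split_description_and_clues(text: str):
--     """Structural recursion on the line list: peel lines off the front until
--     the '## Clues' marker, then a second recursive helper collects the
--     non-empty clue lines."""
--     def clues(lines):
--         if not lines:
--             return []
--         rest = clues(lines[1:])
--         return [lines[0].rstrip("\n")] + rest if lines[0].strip() else rest
--
--     def go(lines):
--         if not lines:
--             return [], []
--         if lines[0].strip().startswith("## Clues"):
--             return [], clues(lines[1:])
--         d, c = go(lines[1:])
--         return [lines[0]] + d, c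
--
--     d, c = go(text.splitlines())
--     return "\n".join(d), c
-- ===== Notes on version B (the rewrite author's own statement) =====
-- stated objective: alternative
-- what changed: Replaces A's single stateful in_clues accumulator loop with structural recursion on the line list: one recursive descent peels description lines until the marker, then a second recursive helper collects the non-empty clue lines.
import Mathlib
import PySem

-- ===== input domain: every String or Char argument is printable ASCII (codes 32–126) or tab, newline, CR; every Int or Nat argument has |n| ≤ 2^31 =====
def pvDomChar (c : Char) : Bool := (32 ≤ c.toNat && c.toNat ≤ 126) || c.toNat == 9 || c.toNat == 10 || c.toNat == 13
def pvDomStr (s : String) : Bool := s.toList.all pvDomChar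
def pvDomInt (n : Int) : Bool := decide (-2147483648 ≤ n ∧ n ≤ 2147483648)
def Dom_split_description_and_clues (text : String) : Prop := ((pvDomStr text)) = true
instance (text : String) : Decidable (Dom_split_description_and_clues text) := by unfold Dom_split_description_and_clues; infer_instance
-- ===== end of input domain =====

-- B replaces A's single stateful in_clues accumulator loop with structural recursion on the line list (objective: alternative decomposition, same cost).

-- hand port of s.rstrip("\n") (drop trailing '\n' characters); exact
def pvRstripNl (s : String) : String :=
  String.ofList ((s.toList.reverse.dropWhile (fun c => c == '\n')).reverse)

-- ===== PORT A =====
-- one loop step of A's for-loop: state = (desc_lines, clue_lines, in_clues)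
def pvStepA (st : List String × List String × Bool) (line : String) :
    List String × List String × Bool :=
  let stripped := PySem.Str.strip line
  if st.2.2 = false then
    if PySem.Str.startswith stripped "## Clues" then (st.1, st.2.1, true)
    else (st.1 ++ [line], st.2.1, st.2.2)
  else
    if stripped ≠ "" then (st.1, st.2.1 ++ [pvRstripNl line], st.2.2)
    else st

def split_description_and_clues (text : String) : String × List String :=
  let lines := PySem.Str.splitlines text
  let st := lines.foldl pvStepA ([], [], false)
  (PySem.Str.join "\n" st.1, st.2.1)

-- ===== PORT B =====
-- recursive helper 'clues' of Source B: collect non-empty lines, rstripped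
def pvCluesRec : List String → List String
  | [] => []
  | l :: ls =>
      let rest := pvCluesRec ls
      if PySem.Str.strip l ≠ "" then pvRstripNl l :: rest else rest

-- recursive helper 'go' of Source B: peel description lines until the marker
def pvGoRec : List String → List String × List String
  | [] => ([], [])
  | l :: ls =>
      if PySem.Str.startswith (PySem.Str.strip l) "## Clues" then ([], pvCluesRec ls)
      else
        let r := pvGoRec ls
        (l :: r.1, r.2)

def split_description_and_clues_alt (text : String) : String × List String :=
  let r := pvGoRec (PySem.Str.splitlines text)
  (PySem.Str.join "\n" r.1, r.2)

-- ===== PRECONDITION & SPEC =====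
def Spec_split_description_and_clues (text : String) (out : String × List String) : Prop := out = split_description_and_clues_alt text
instance (text : String) (out : String × List String) : Decidable (Spec_split_description_and_clues text out) := by unfold Spec_split_description_and_clues; infer_instance

-- ===== CLAIM (what is proved, stated in full; the proofs are below) =====
def Claim_equal_split_description_and_clues : Prop := ∀ (text : String), Dom_split_description_and_clues text → Spec_split_description_and_clues text (split_description_and_clues text)

-- ===== LEMMAS AND PROOFS =====

-- once in_clues is true, A only appends the non-empty lines (rstripped) to clue_lines,
-- exactly what B's recursive 'clues' collects
theorem pv_fold_true (ls : List String) (desc clue : List String) :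
    ls.foldl pvStepA (desc, clue, true) = (desc, clue ++ pvCluesRec ls, true) := by
  induction ls generalizing clue with
  | nil => simp [pvCluesRec]
  | cons l ls ih =>
      simp only [List.foldl_cons, pvCluesRec]
      by_cases h : PySem.Str.strip l ≠ ""
      · simp [pvStepA, h, ih]
      · simp [pvStepA, h, ih]

-- whether A's flag ends up set: some line starts with the marker
def pvHasMarker (ls : List String) : Bool :=
  ls.any (fun l => PySem.Str.startswith (PySem.Str.strip l) "## Clues")

-- A's fold from the initial state computes B's recursive 'go'
theorem pv_fold_main (ls : List String) (desc : List String) :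
    ls.foldl pvStepA (desc, [], false) =
      (desc ++ (pvGoRec ls).1, (pvGoRec ls).2, pvHasMarker ls) := by
  induction ls generalizing desc with
  | nil => simp [pvGoRec, pvHasMarker]
  | cons l ls ih =>
      by_cases h : PySem.Str.startswith (PySem.Str.strip l) "## Clues" = true
      · have h' : PySem.Chars.startswith (PySem.Chars.strip l.toList)
            ['#', '#', ' ', 'C', 'l', 'u', 'e', 's'] = true := by simpa using h
        simp only [List.foldl_cons, pvGoRec, h, if_true]
        simp [pvStepA, h', pv_fold_true, pvHasMarker]
      · have h' : PySem.Chars.startswith (PySem.Chars.strip l.toList)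
            ['#', '#', ' ', 'C', 'l', 'u', 'e', 's'] = false := by
          simpa using h
        simp only [List.foldl_cons, pvGoRec, h, Bool.false_eq_true, if_false]
        simp only [pvStepA]
        rw [if_neg h, if_pos trivial, ih (desc ++ [l])]
        simp [pvHasMarker, h']

-- ===== VERDICT (by name: the statement is the Claim_ definition above) =====
theorem split_description_and_clues_spec : Claim_equal_split_description_and_clues := by
  intro text _
  unfold Spec_split_description_and_clues split_description_and_clues split_description_and_clues_alt
  simp only [pv_fold_main]
  simp
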